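-- pv_equiv track=rewrite | github.com/jfalcou/eve | test/asm/scripts/clean_up_asm.py | _split_by_function
-- ===== SOURCE A (Python) =====
-- def _split_by_function(lines):
--     asm_by_function = {}
--
--     current_function = ''
--     for line in lines:
--         if line[0] != ' ':
--             current_function = line.split('(')[0]
--             if current_function not in asm_by_function:
--                 asm_by_function[current_function] = ''
--             else:
--                 asm_by_function[current_function] += '\n'
--         asm_by_function[current_function] += line
--         asm_by_function[current_function] += '\n'
--
--     return asm_by_function
-- ===== SOURCE B (Python) =====
-- def _split_by_function(lines):
--     # Pass 1: partition lines into contiguous segments, one per header line.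
--     segments = []
--     for line in lines:
--         if line[0] != ' ':
--             segments.append((line.split('(')[0], [line]))
--         else:
--             segments[-1][1].append(line)
--     # Pass 2: join each segment once, then merge segments per key
--     # (a repeated key gets an extra '\n' between its blocks).
--     out = {}
--     for key, seg in segments:
--         text = '\n'.join(seg) + '\n'
--         out[key] = out[key] + '\n' + text if key in out else text
--     return out
-- ===== Notes on version B (the rewrite author's own statement) =====
-- stated objective: alternative
-- what changed: Two-pass decomposition: first partition the lines into contiguous per-header segments, then join each segment once and merge segments per function name, instead of A's single pass mutating one dict entry line by line.
import Mathlib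
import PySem

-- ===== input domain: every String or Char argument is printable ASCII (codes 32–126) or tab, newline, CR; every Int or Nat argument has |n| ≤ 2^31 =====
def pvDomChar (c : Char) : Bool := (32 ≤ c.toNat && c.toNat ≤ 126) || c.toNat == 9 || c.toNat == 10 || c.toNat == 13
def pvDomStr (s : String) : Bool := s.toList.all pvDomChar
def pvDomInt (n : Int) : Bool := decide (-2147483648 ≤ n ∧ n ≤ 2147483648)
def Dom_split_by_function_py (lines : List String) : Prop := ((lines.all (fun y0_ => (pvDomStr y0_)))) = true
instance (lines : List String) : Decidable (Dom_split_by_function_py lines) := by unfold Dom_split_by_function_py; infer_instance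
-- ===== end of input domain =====

-- B regroups the lines in two passes (contiguous segments first, then a per-key merge) instead of
-- A's single pass that mutates one dict entry line by line; same cost, different decomposition.

-- ===== PORT A =====
def splitA_step (st : PySem.Dict String String × String) (line : String) :
    PySem.Dict String String × String :=
  match PySem.Str.pyGet? line 0 with
  | none => st  -- line[0]: IndexError on an empty line (outside Pre_)
  | some c =>
    let st1 :=
      if c ≠ ' ' then
        let cf := ((PySem.Str.split? line "(").getD []).headD ""   -- line.split('(')[0]; split never returns [] and '(' is not empty
        if st.1.contains cf = false then (st.1.insert cf "", cf)
        else
          match st.1.get? cf with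
          | some v => (st.1.insert cf (v ++ "\n"), cf)    -- asm_by_function[cf] += '\n'
          | none => (st.1, cf)                            -- unreachable (contains = true)
      else st
    match st1.1.get? st1.2 with
    | none => st1   -- KeyError: indented line before any header (outside Pre_)
    | some v =>
      let d2 := st1.1.insert st1.2 (v ++ line)            -- asm_by_function[cf] += line
      match d2.get? st1.2 with
      | none => (d2, st1.2)                               -- unreachable
      | some v2 => (d2.insert st1.2 (v2 ++ "\n"), st1.2)  -- asm_by_function[cf] += '\n'

def split_by_function_py (lines : List String) : List (String × String) :=
  (lines.foldl splitA_step (PySem.Dict.empty, "")).1.items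

-- ===== PORT B =====
def splitB_seg (segs : List (String × List String)) (line : String) :
    List (String × List String) :=
  match PySem.Str.pyGet? line 0 with
  | none => segs  -- line[0]: IndexError on an empty line (outside Pre_)
  | some c =>
    if c ≠ ' ' then segs ++ [(((PySem.Str.split? line "(").getD []).headD "", [line])]
    else
      match segs.getLast? with
      | none => segs  -- segments[-1]: IndexError, indented line before any header (outside Pre_)
      | some p => segs.dropLast ++ [(p.1, p.2 ++ [line])]

def splitB_merge (out : PySem.Dict String String) (p : String × List String) :
    PySem.Dict String String :=
  let text := PySem.Str.join "\n" p.2 ++ "\n"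
  match out.get? p.1 with
  | some v => out.insert p.1 (v ++ "\n" ++ text)
  | none => out.insert p.1 text

def split_by_function_py_alt (lines : List String) : List (String × String) :=
  ((lines.foldl splitB_seg []).foldl splitB_merge PySem.Dict.empty).items

-- ===== PRECONDITION & SPEC =====
-- Pre_ excludes exactly the inputs where the Python A raises: an empty line (IndexError on
-- line[0]) or an indented line before any header (KeyError on asm_by_function['']).
def Pre_split_by_function_py (lines : List String) : Prop :=
  (∀ l ∈ lines, l.toList ≠ []) ∧ ∀ l ∈ lines.take 1, l.toList.head? ≠ some ' '
instance (lines : List String) : Decidable (Pre_split_by_function_py lines) := by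
  unfold Pre_split_by_function_py; infer_instance

def pvWitness_split_by_function_py : List String := ["f(int)", " mov eax, 1", "g", " ret"]

def Spec_split_by_function_py (lines : List String) (out : List (String × String)) : Prop :=
  out = split_by_function_py_alt lines
instance (lines : List String) (out : List (String × String)) :
    Decidable (Spec_split_by_function_py lines out) := by
  unfold Spec_split_by_function_py; infer_instance

-- ===== CLAIM (what is proved, stated in full; the proofs are below) =====
def Claim_equal_split_by_function_py : Prop :=
  ∀ (lines : List String), Dom_split_by_function_py lines → Pre_split_by_function_py lines →
    Spec_split_by_function_py lines (split_by_function_py lines)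

-- ===== LEMMAS AND PROOFS =====

-- abbreviations for B's two folds, used only by the proofs
def dictOfSegs (segs : List (String × List String)) : PySem.Dict String String :=
  segs.foldl splitB_merge PySem.Dict.empty

def lastKey (segs : List (String × List String)) : String := (segs.getLastD ("", [])).1

lemma charsJoin_concat (sep y : List Char) (a : List Char) (tl : List (List Char)) :
    PySem.Chars.join sep ((a :: tl) ++ [y]) = PySem.Chars.join sep (a :: tl) ++ sep ++ y := by
  induction tl generalizing a with
  | nil => simp [PySem.Chars.join_cons_cons, PySem.Chars.join_singleton, List.append_assoc]
  | cons b u ih =>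
    simp only [List.cons_append, PySem.Chars.join_cons_cons]
    rw [show b :: (u ++ [y]) = (b :: u) ++ [y] from rfl, ih b]
    simp [List.append_assoc]

lemma strJoin_concat (sep y : String) (xs : List String) (h : xs ≠ []) :
    PySem.Str.join sep (xs ++ [y]) = PySem.Str.join sep xs ++ sep ++ y := by
  obtain ⟨a, tl, rfl⟩ := List.exists_cons_of_ne_nil h
  apply String.toList_injective
  simp only [String.toList_append, PySem.Str.toList_join, List.map_append, List.map]
  exact charsJoin_concat _ _ _ _

lemma strJoin_singleton (sep x : String) : PySem.Str.join sep [x] = x := by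
  apply String.toList_injective
  simp [PySem.Chars.join_singleton]

lemma dictOfSegs_concat (segs : List (String × List String)) (p : String × List String) :
    dictOfSegs (segs ++ [p]) = splitB_merge (dictOfSegs segs) p := by
  simp [dictOfSegs, List.foldl_append]

lemma lastKey_concat (segs : List (String × List String)) (p : String × List String) :
    lastKey (segs ++ [p]) = p.1 := by
  simp [lastKey]

-- one line of the two traversals stays in lockstep
lemma splitAB_step (segs : List (String × List String)) (hseg : ∀ p ∈ segs, p.2 ≠ [])
    (line : String) :
    splitA_step (dictOfSegs segs, lastKey segs) line
        = (dictOfSegs (splitB_seg segs line), lastKey (splitB_seg segs line))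
      ∧ ∀ p ∈ splitB_seg segs line, p.2 ≠ [] := by
  cases h0 : PySem.List.pyGet? line.toList 0 with
  | none =>
    have hB : splitB_seg segs line = segs := by simp [splitB_seg, h0]
    refine ⟨by simp [splitA_step, hB, h0], ?_⟩
    rw [hB]; exact hseg
  | some c =>
    by_cases hc : c = ' '
    · subst hc
      cases hsegs : segs.getLast? with
      | none =>
        have hnil : segs = [] := List.getLast?_eq_none_iff.mp hsegs
        subst hnil
        refine ⟨?_, ?_⟩
        · simp [splitA_step, splitB_seg, h0, lastKey, dictOfSegs, PySem.Dict.get?_empty]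
        · have hB : splitB_seg [] line = [] := by simp [splitB_seg, h0]
          rw [hB]; simp
      | some p =>
        obtain ⟨init, rfl⟩ := List.getLast?_eq_some_iff.mp hsegs
        have hsegne : p.2 ≠ [] := hseg p (by simp)
        have hBs : splitB_seg (init ++ [p]) line = init ++ [(p.1, p.2 ++ [line])] := by
          simp [splitB_seg, h0, hsegs]
        refine ⟨?_, ?_⟩
        · rw [hBs, dictOfSegs_concat, dictOfSegs_concat, lastKey_concat, lastKey_concat]
          cases hg : (dictOfSegs init).get? p.1 with
          | some v =>
            simp [splitA_step, splitB_merge, h0, hg, PySem.Dict.get?_insert_self,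
                  PySem.Dict.insert_insert_self, strJoin_concat "\n" line p.2 hsegne,
                  String.append_assoc]
          | none =>
            simp [splitA_step, splitB_merge, h0, hg, PySem.Dict.get?_insert_self,
                  PySem.Dict.insert_insert_self, strJoin_concat "\n" line p.2 hsegne,
                  String.append_assoc]
        · rw [hBs]
          intro q hq
          rcases List.mem_append.mp hq with h1 | h1
          · exact hseg q (List.mem_append_left _ h1)
          · simp only [List.mem_singleton] at h1
            subst h1; simp
    · have hBs : splitB_seg segs line
          = segs ++ [(((PySem.Str.split? line "(").getD []).headD "", [line])] := by
        simp [splitB_seg, h0, hc]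
      refine ⟨?_, ?_⟩
      · rw [hBs, dictOfSegs_concat, lastKey_concat]
        cases hg : (dictOfSegs segs).get? (((PySem.Str.split? line "(").getD []).head?.getD "") with
        | some v =>
          have hcont : (dictOfSegs segs).contains
              (((PySem.Str.split? line "(").getD []).head?.getD "") = true := by
            rw [PySem.Dict.contains_eq_isSome_get?, hg]; rfl
          simp [splitA_step, splitB_merge, h0, hc, hg, hcont, PySem.Dict.get?_insert_self,
                PySem.Dict.insert_insert_self, strJoin_singleton, String.append_assoc]
        | none =>
          have hcont : (dictOfSegs segs).contains
              (((PySem.Str.split? line "(").getD []).head?.getD "") = false := by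
            rw [PySem.Dict.contains_eq_isSome_get?, hg]; rfl
          simp [splitA_step, splitB_merge, h0, hc, hg, hcont, PySem.Dict.get?_insert_self,
                PySem.Dict.insert_insert_self, strJoin_singleton]
      · rw [hBs]
        intro q hq
        rcases List.mem_append.mp hq with h1 | h1
        · exact hseg q h1
        · simp only [List.mem_singleton] at h1
          subst h1; simp

lemma splitAB_inv (lines : List String) :
    ∀ segs : List (String × List String), (∀ p ∈ segs, p.2 ≠ []) →
      lines.foldl splitA_step (dictOfSegs segs, lastKey segs)
          = (dictOfSegs (lines.foldl splitB_seg segs), lastKey (lines.foldl splitB_seg segs))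
        ∧ ∀ p ∈ lines.foldl splitB_seg segs, p.2 ≠ [] := by
  induction lines with
  | nil => intro segs h; exact ⟨rfl, h⟩
  | cons line rest ih =>
    intro segs hseg
    have key := splitAB_step segs hseg line
    simp only [List.foldl_cons, key.1]
    exact ih _ key.2

-- ===== VERDICT (by name: the statement is the Claim_ definition above) =====
theorem split_by_function_py_spec : Claim_equal_split_by_function_py := by
  intro lines _ _
  unfold Spec_split_by_function_py split_by_function_py split_by_function_py_alt
  have h := (splitAB_inv lines [] (by simp)).1
  have h0 : (dictOfSegs [], lastKey []) = ((PySem.Dict.empty : PySem.Dict String String), "") := rfl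
  rw [h0] at h
  rw [h]
  rfl
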